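-- pv_equiv track=rewrite | github.com/eduard-romaniuk/algo-problems | advent-of-code/2022/22/parsing.py | parse_movements
-- ===== SOURCE A (Python) =====
-- def parse_movements(data: str) -> list[str]:
--     directions = 'LR'
--     result = []
--     i = 0
--     while i < len(data):
--         if data[i] in directions:
--             result.append(data[i])
--             i += 1
--             continue
--         tmp = ""
--         while i < len(data) and data[i] not in directions:
--             tmp += data[i]
--             i += 1
--         result.append(tmp)
--     return result
-- ===== SOURCE B (Python) =====
-- import re
--
-- def parse_movements(data: str) -> list[str]:
--     return re.findall(r'[LR]|[^LR]+', data)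
-- ===== Notes on version B (the rewrite author's own statement) =====
-- stated objective: faster
-- what changed: Replaces the manual index-advancing nested-while scan (with quadratic tmp += string concatenation) by a single linear regex findall whose alternation [LR]|[^LR]+ yields turn tokens and maximal non-turn runs.
import Mathlib
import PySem

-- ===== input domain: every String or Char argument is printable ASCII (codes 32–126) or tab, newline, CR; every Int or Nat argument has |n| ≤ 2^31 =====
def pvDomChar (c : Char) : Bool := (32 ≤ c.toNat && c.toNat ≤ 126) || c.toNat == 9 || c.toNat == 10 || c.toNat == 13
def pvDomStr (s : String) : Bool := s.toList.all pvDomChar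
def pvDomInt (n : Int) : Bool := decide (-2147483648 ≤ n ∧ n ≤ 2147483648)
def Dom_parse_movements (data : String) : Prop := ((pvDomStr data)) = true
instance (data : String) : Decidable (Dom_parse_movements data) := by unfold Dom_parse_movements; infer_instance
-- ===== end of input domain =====

-- B replaces A's manual index-advancing nested-while tokenizer by one regex findall
-- (r'[LR]|[^LR]+'); equivalence of the return values is proved on all inputs (both are total).

-- ===== PORT A =====
-- `data[i] in 'LR'`
def pmIsLR (c : Char) : Bool := c = 'L' || c = 'R'

-- A's inner while loop: accumulates tmp (as a char list) until an L/R or the end;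
-- returns (tmp, remaining input).
def pmInner : List Char → List Char → List Char × List Char
  | tmp, [] => (tmp, [])
  | tmp, c :: rest => if pmIsLR c then (tmp, c :: rest) else pmInner (tmp ++ [c]) rest

-- termination measure for the outer loop: the inner loop never grows the remainder
theorem pmInner_snd_length : ∀ (l tmp : List Char), (pmInner tmp l).2.length ≤ l.length := by
  intro l
  induction l with
  | nil => intro tmp; simp [pmInner]
  | cons c rest ih =>
    intro tmp
    by_cases h : pmIsLR c = true <;> simp [pmInner, h]
    · exact Nat.le_trans (ih _) (Nat.le_succ _)

-- A's outer while loop over the remaining input.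
def pmOuter : List Char → List String
  | [] => []
  | c :: rest =>
    if pmIsLR c then String.mk [c] :: pmOuter rest
    else
      let p := pmInner [c] rest
      String.mk p.1 :: pmOuter p.2
  termination_by l => l.length
  decreasing_by
    · simp
    · simpa using Nat.lt_succ_of_le (pmInner_snd_length rest [c])

def parse_movements (data : String) : List String := pmOuter data.toList

-- ===== PORT B =====
-- Hand port of re.findall(r'[LR]|[^LR]+', data): at each position the alternation
-- matches either a single L/R or the maximal (greedy) run of non-L/R characters.
def pmFind : List Char → List String
  | [] => []
  | c :: rest =>
    if pmIsLR c then String.mk [c] :: pmFind rest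
    else
      String.mk (List.takeWhile (fun x => !pmIsLR x) (c :: rest)) ::
        pmFind (List.dropWhile (fun x => !pmIsLR x) (c :: rest))
  termination_by l => l.length
  decreasing_by
    · simp
    · simp only [List.dropWhile]
      simp_all
      exact List.length_dropWhile_le _ _

def parse_movements_alt (data : String) : List String := pmFind data.toList

-- ===== PRECONDITION & SPEC =====
def Spec_parse_movements (data : String) (out : List String) : Prop := out = parse_movements_alt data
instance (data : String) (out : List String) : Decidable (Spec_parse_movements data out) := by unfold Spec_parse_movements; infer_instance

-- ===== CLAIM (what is proved, stated in full; the proofs are below) =====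
def Claim_equal_parse_movements : Prop := ∀ (data : String), Dom_parse_movements data → Spec_parse_movements data (parse_movements data)

-- ===== LEMMAS AND PROOFS =====
theorem pmInner_eq : ∀ (l tmp : List Char),
    pmInner tmp l = (tmp ++ List.takeWhile (fun x => !pmIsLR x) l,
                     List.dropWhile (fun x => !pmIsLR x) l) := by
  intro l
  induction l with
  | nil => intro tmp; simp [pmInner]
  | cons c rest ih =>
    intro tmp
    by_cases h : pmIsLR c = true <;>
      simp [pmInner, h, List.takeWhile, List.dropWhile, ih]

theorem pmOuter_eq_pmFind : ∀ (n : ℕ) (l : List Char), l.length ≤ n → pmOuter l = pmFind l := by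
  intro n
  induction n with
  | zero =>
    intro l hl
    have : l = [] := List.eq_nil_of_length_eq_zero (Nat.le_zero.mp hl)
    subst this; simp [pmOuter, pmFind]
  | succ n ih =>
    intro l hl
    match l with
    | [] => simp [pmOuter, pmFind]
    | c :: rest =>
      by_cases h : pmIsLR c = true
      · simp only [pmOuter, pmFind, h, if_pos]
        exact congrArg _ (ih rest (Nat.le_of_succ_le_succ hl))
      · simp only [pmOuter, pmFind, h, if_neg, Bool.not_eq_true]
        rw [pmInner_eq]
        simp only [List.takeWhile, List.dropWhile, h, Bool.not_false,
          List.singleton_append]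
        refine congrArg _ (ih _ ?_)
        exact Nat.le_trans (List.length_dropWhile_le _ _) (Nat.le_of_succ_le_succ hl)

-- ===== VERDICT (by name: the statement is the Claim_ definition above) =====
theorem parse_movements_spec : Claim_equal_parse_movements := by
  intro data _
  unfold Spec_parse_movements parse_movements parse_movements_alt
  exact pmOuter_eq_pmFind data.toList.length data.toList le_rfl
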